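-- pv_equiv track=rewrite | github.com/tinchoz8426/Inteligencia-Artificial-Prompt-Engineering-para-programadores | Clase1/06_funciones_inventadas/intercalar_palabras.py | intercalar_palabras
-- ===== SOURCE A (Python) =====
-- def intercalar_palabras(cadena1, cadena2):
--     # Dividir ambas cadenas en listas de palabras
--     palabras1 = cadena1.split()
--     palabras2 = cadena2.split()
--
--     # Determinar la longitud de las listas
--     longitud_maxima = max(len(palabras1), len(palabras2))
--
--     # Intercalar palabras
--     resultado = []
--     for i in range(longitud_maxima):
--         if i < len(palabras1):
--             resultado.append(palabras1[i])
--         if i < len(palabras2):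
--             resultado.append(palabras2[i])
--
--     # Unir las palabras intercaladas en una sola cadena y devolverla
--     return ' '.join(resultado)
-- ===== SOURCE B (Python) =====
-- def _merge(l1, l2):
--     # Structural recursion on the two word lists: no indices, no lengths, no slices
--     # beyond peeling the head; the base cases absorb whichever tail is left over.
--     if not l1:
--         return l2
--     if not l2:
--         return l1
--     return [l1[0], l2[0]] + _merge(l1[1:], l2[1:])
--
--
-- def intercalar_palabras(cadena1, cadena2):
--     return ' '.join(_merge(cadena1.split(), cadena2.split()))
-- ===== Notes on version B (the rewrite author's own statement) =====
-- stated objective: simpler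
-- what changed: Replaces A's index loop over range(max(len,len)) with two per-iteration bound guards by a structural recursion on the two word lists: base cases return the remaining list, the step emits both heads and recurses on the tails, so no lengths, indices or guards are computed.
import Mathlib
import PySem

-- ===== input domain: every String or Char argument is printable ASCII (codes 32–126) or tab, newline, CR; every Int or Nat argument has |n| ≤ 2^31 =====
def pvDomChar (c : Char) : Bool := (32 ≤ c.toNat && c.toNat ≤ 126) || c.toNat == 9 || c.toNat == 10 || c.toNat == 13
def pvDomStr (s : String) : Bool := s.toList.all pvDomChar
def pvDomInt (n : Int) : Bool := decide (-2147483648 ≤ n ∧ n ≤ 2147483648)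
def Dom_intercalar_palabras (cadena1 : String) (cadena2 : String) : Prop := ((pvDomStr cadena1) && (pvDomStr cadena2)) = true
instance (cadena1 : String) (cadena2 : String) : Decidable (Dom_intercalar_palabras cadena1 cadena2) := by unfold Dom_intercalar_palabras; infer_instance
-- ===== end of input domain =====

-- B replaces A's index loop (range over the max length with two per-iteration bound
-- guards) by a structural recursion on the two word lists, for simplicity.

-- ===== PORT A =====
def intercalar_palabras (cadena1 : String) (cadena2 : String) : String :=
  let palabras1 := PySem.Str.split₀ cadena1
  let palabras2 := PySem.Str.split₀ cadena2
  let longitud_maxima := max (PySem.List.len palabras1) (PySem.List.len palabras2)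
  let resultado := (PySem.List.pyRange 0 longitud_maxima 1).foldl (fun res i =>
    let res := if i < PySem.List.len palabras1 then res ++ [PySem.List.pyGetD palabras1 i ""] else res
    if i < PySem.List.len palabras2 then res ++ [PySem.List.pyGetD palabras2 i ""] else res) []
  PySem.Str.join " " resultado

-- ===== PORT B =====
-- _merge: 'if not l1: return l2; if not l2: return l1; [l1[0], l2[0]] + _merge(l1[1:], l2[1:])'
def pvMergeB : List String → List String → List String
  | [], l2 => l2
  | l1, [] => l1
  | w1 :: l1, w2 :: l2 => w1 :: w2 :: pvMergeB l1 l2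

def intercalar_palabras_alt (cadena1 : String) (cadena2 : String) : String :=
  PySem.Str.join " " (pvMergeB (PySem.Str.split₀ cadena1) (PySem.Str.split₀ cadena2))

-- ===== PRECONDITION & SPEC =====
def Spec_intercalar_palabras (cadena1 : String) (cadena2 : String) (out : String) : Prop := out = intercalar_palabras_alt cadena1 cadena2
instance (cadena1 : String) (cadena2 : String) (out : String) : Decidable (Spec_intercalar_palabras cadena1 cadena2 out) := by unfold Spec_intercalar_palabras; infer_instance

-- ===== CLAIM (what is proved, stated in full; the proofs are below) =====
def Claim_equal_intercalar_palabras : Prop := ∀ (cadena1 : String) (cadena2 : String), Dom_intercalar_palabras cadena1 cadena2 → Spec_intercalar_palabras cadena1 cadena2 (intercalar_palabras cadena1 cadena2)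

-- ===== LEMMAS AND PROOFS =====

-- The per-index contribution of A's loop body.
def pvG (xs ys : List String) (i : Nat) : List String :=
  (if i < xs.length then [xs.getD i ""] else []) ++ (if i < ys.length then [ys.getD i ""] else [])

theorem pvFlat_single : ∀ (l : List String),
    (List.range l.length).flatMap (fun i => if i < l.length then [l.getD i ""] else []) = l := by
  intro l
  induction l with
  | nil => simp
  | cons x xs ih =>
    have h : (List.range (xs.length + 1)) = 0 :: List.map Nat.succ (List.range xs.length) :=
      List.range_succ_eq_map
    simp only [List.length_cons, h, List.flatMap_cons, List.flatMap_map]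
    simp only [Nat.succ_eq_add_one]
    simpa using ih

theorem pvA_core : ∀ (xs ys : List String),
    (List.range (max xs.length ys.length)).flatMap (pvG xs ys) = pvMergeB xs ys := by
  intro xs
  induction xs with
  | nil =>
    intro ys
    simp only [pvMergeB, List.length_nil, Nat.zero_max]
    have : pvG [] ys = fun i => if i < ys.length then [ys.getD i ""] else [] := by
      funext i; simp [pvG]
    rw [this, pvFlat_single]
  | cons x xs ih =>
    intro ys
    cases ys with
    | nil =>
      simp only [pvMergeB, List.length_nil, Nat.max_zero]
      have : pvG (x :: xs) [] = fun i => if i < (x :: xs).length then [(x :: xs).getD i ""] else [] := by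
        funext i; simp [pvG]
      rw [this, pvFlat_single]
    | cons y ys =>
      have h : max (x :: xs).length (y :: ys).length = max xs.length ys.length + 1 := by
        simp [Nat.succ_max_succ]
      rw [h, List.range_succ_eq_map, List.flatMap_cons, List.flatMap_map]
      have h0 : pvG (x :: xs) (y :: ys) 0 = [x, y] := by simp [pvG]
      have hs : (fun a => pvG (x :: xs) (y :: ys) a.succ) = pvG xs ys := by
        funext i; simp [pvG]
      rw [h0, hs, ih ys]
      rfl

theorem pvBody_flat (p1 p2 : List String) (l : List Nat) (acc : List String) :
    (List.map (fun k : Nat => (k : Int)) l).foldl (fun res i =>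
      let res := if i < PySem.List.len p1 then res ++ [PySem.List.pyGetD p1 i ""] else res
      if i < PySem.List.len p2 then res ++ [PySem.List.pyGetD p2 i ""] else res) acc
    = acc ++ l.flatMap (pvG p1 p2) := by
  induction l generalizing acc with
  | nil => simp
  | cons k l ih =>
    simp only [List.map_cons, List.foldl_cons, List.flatMap_cons]
    rw [ih]
    simp only [PySem.List.len_eq, PySem.List.pyGetD_natCast, Nat.cast_lt, pvG]
    split_ifs <;> simp

-- ===== VERDICT (by name: the statement is the Claim_ definition above) =====
theorem intercalar_palabras_spec : Claim_equal_intercalar_palabras := by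
  intro cadena1 cadena2 _
  unfold Spec_intercalar_palabras intercalar_palabras intercalar_palabras_alt
  set p1 := PySem.Str.split₀ cadena1 with hp1
  set p2 := PySem.Str.split₀ cadena2 with hp2
  simp only [PySem.List.len_eq]
  have hmax : max ((p1.length : Int)) ((p2.length : Int)) = ((max p1.length p2.length : Nat) : Int) := by
    simp [Nat.cast_max]
  rw [hmax, PySem.List.pyRange_zero_natCast]
  have := pvBody_flat p1 p2 (List.range (max p1.length p2.length)) []
  simp only [PySem.List.len_eq] at this
  rw [this, List.nil_append, pvA_core]
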